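-- pv_equiv track=rewrite | github.com/python-acoustics/python-acoustics | acoustics/standards/iso_1996_2_2007.py | _search_noise_pauses
-- ===== SOURCE A (Python) =====
-- def _search_noise_pauses(levels, tsc):
--     #starts = list()
--     #ends = list()
--     pauses = list()
--     possible_start = None
--     for i in range(2, len(levels)-2):
--             if (levels[i] - levels[i-1]) >= tsc and (levels[i-1] - levels[i-2]) < tsc:
--                 possible_start = i
--                 #starts.append(i)
--             if (levels[i] - levels[i+1]) >= tsc and (levels[i+1] - levels[i+2]) < tsc:
--                 if possible_start:
--                     #starts.append(possible_start)
--                     pauses.append((possible_start, i))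
--                     possible_start = None
--                     #ends.append(i)
--     #return starts, ends
--     return pauses
-- ===== SOURCE B (Python) =====
-- def _search_noise_pauses(levels, tsc):
--     rng = range(2, len(levels) - 2)
--     starts = [i for i in rng if levels[i] - levels[i-1] >= tsc and levels[i-1] - levels[i-2] < tsc]
--     ends = [i for i in rng if levels[i] - levels[i+1] >= tsc and levels[i+1] - levels[i+2] < tsc]
--     pauses = []
--     j = 0
--     pending = None
--     for e in ends:
--         while j < len(starts) and starts[j] <= e:
--             pending = starts[j]
--             j += 1
--         if pending is not None:
--             pauses.append((pending, e))
--             pending = None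
--     return pauses
-- ===== Notes on version B (the rewrite author's own statement) =====
-- stated objective: alternative
-- what changed: A interleaves start-detection and pause-pairing in one stateful scan; B first builds the lists of start events and end events by two comprehensions over the range, then pairs them with a two-pointer merge (latest unconsumed start <= each end).
import Mathlib
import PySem

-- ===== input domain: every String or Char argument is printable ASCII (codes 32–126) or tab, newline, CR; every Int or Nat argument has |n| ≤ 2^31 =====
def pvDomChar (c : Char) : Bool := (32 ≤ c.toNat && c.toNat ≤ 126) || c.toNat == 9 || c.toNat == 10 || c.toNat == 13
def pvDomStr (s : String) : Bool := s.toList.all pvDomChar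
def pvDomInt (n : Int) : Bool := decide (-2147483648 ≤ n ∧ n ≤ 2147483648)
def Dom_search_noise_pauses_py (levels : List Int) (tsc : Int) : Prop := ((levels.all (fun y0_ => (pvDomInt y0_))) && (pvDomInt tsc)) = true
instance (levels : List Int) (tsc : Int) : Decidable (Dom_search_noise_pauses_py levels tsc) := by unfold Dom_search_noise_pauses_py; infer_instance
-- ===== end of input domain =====

-- B replaces A's single stateful scan by two event-comprehensions plus a two-pointer pairing pass (objective: alternative decomposition, same cost).

-- ===== PORT A =====
-- Loop indices i satisfy 2 ≤ i < len-2, so every read levels[i-2..i+2] is in range and pyGetD's default is never used.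
def search_noise_pauses_py (levels : List Int) (tsc : Int) : List (Int × Int) :=
  ((PySem.List.pyRange 2 ((levels.length : Int) - 2) 1).foldl
    (fun st i =>
      let st1 : List (Int × Int) × Option Int :=
        if PySem.List.pyGetD levels i 0 - PySem.List.pyGetD levels (i-1) 0 ≥ tsc ∧
           PySem.List.pyGetD levels (i-1) 0 - PySem.List.pyGetD levels (i-2) 0 < tsc
        then (st.1, some i) else st
      if PySem.List.pyGetD levels i 0 - PySem.List.pyGetD levels (i+1) 0 ≥ tsc ∧
         PySem.List.pyGetD levels (i+1) 0 - PySem.List.pyGetD levels (i+2) 0 < tsc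
      then
        -- `if possible_start:` — the loop only ever stores i ≥ 2 (never 0), so truthiness = "is not None"
        match st1.2 with
        | some s => (st1.1 ++ [(s, i)], none)
        | none => st1
      else st1)
    ([], none)).1

-- ===== PORT B =====
-- Port of Source B's while-loop over pointer j: the two-pointer consumption of `starts[j:]`,
-- transcribed as structural recursion on the not-yet-consumed tail of `starts`.
def pvTake (e : Int) : Option Int → List Int → Option Int × List Int
  | pending, [] => (pending, [])
  | pending, s :: rest => if s ≤ e then pvTake e (some s) rest else (pending, s :: rest)

-- Port of Source B's `for e in ends` pairing loop.
def pvPair : List Int → Option Int → List (Int × Int) → List Int → List (Int × Int)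
  | _, _, pauses, [] => pauses
  | starts, pending, pauses, e :: es =>
    match pvTake e pending starts with
    | (some s, starts') => pvPair starts' none (pauses ++ [(s, e)]) es
    | (none, starts') => pvPair starts' none pauses es

def search_noise_pauses_py_alt (levels : List Int) (tsc : Int) : List (Int × Int) :=
  let r := PySem.List.pyRange 2 ((levels.length : Int) - 2) 1
  let starts := r.filter (fun i => decide (PySem.List.pyGetD levels i 0 - PySem.List.pyGetD levels (i-1) 0 ≥ tsc ∧
                                           PySem.List.pyGetD levels (i-1) 0 - PySem.List.pyGetD levels (i-2) 0 < tsc))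
  let ends := r.filter (fun i => decide (PySem.List.pyGetD levels i 0 - PySem.List.pyGetD levels (i+1) 0 ≥ tsc ∧
                                         PySem.List.pyGetD levels (i+1) 0 - PySem.List.pyGetD levels (i+2) 0 < tsc))
  pvPair starts none [] ends

-- ===== PRECONDITION & SPEC =====
def Spec_search_noise_pauses_py (levels : List Int) (tsc : Int) (out : List (Int × Int)) : Prop := out = search_noise_pauses_py_alt levels tsc
instance (levels : List Int) (tsc : Int) (out : List (Int × Int)) : Decidable (Spec_search_noise_pauses_py levels tsc out) := by unfold Spec_search_noise_pauses_py; infer_instance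

-- ===== CLAIM (what is proved, stated in full; the proofs are below) =====
def Claim_equal_search_noise_pauses_py : Prop := ∀ (levels : List Int) (tsc : Int), Dom_search_noise_pauses_py levels tsc → Spec_search_noise_pauses_py levels tsc (search_noise_pauses_py levels tsc)

-- ===== LEMMAS AND PROOFS =====

theorem pvPair_cons (s : Int) (starts : List Int) (pending : Option Int)
    (pauses : List (Int × Int)) (es : List Int) (h : ∀ e ∈ es, s ≤ e) :
    pvPair (s :: starts) pending pauses es = pvPair starts (some s) pauses es := by
  cases es with
  | nil => rfl
  | cons e es' =>
    have hs : s ≤ e := h e (by simp)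
    simp [pvPair, pvTake, hs]

theorem pvTake_gt (e : Int) (pending : Option Int) (starts : List Int)
    (h : ∀ s ∈ starts, e < s) : pvTake e pending starts = (pending, starts) := by
  cases starts with
  | nil => rfl
  | cons s rest =>
    have := h s (by simp)
    simp [pvTake]; omega

theorem pv_main (levels : List Int) (tsc : Int) : ∀ (n : ℕ) (a : Int),
    ((levels.length : Int) - 2 - a).toNat = n → ∀ (pauses : List (Int × Int)) (pending : Option Int),
    ((PySem.List.pyRange a ((levels.length : Int) - 2) 1).foldl
      (fun st i =>
        let st1 : List (Int × Int) × Option Int :=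
          if PySem.List.pyGetD levels i 0 - PySem.List.pyGetD levels (i-1) 0 ≥ tsc ∧
             PySem.List.pyGetD levels (i-1) 0 - PySem.List.pyGetD levels (i-2) 0 < tsc
          then (st.1, some i) else st
        if PySem.List.pyGetD levels i 0 - PySem.List.pyGetD levels (i+1) 0 ≥ tsc ∧
           PySem.List.pyGetD levels (i+1) 0 - PySem.List.pyGetD levels (i+2) 0 < tsc
        then
          match st1.2 with
          | some s => (st1.1 ++ [(s, i)], none)
          | none => st1
        else st1)
      (pauses, pending)).1
    = pvPair
        ((PySem.List.pyRange a ((levels.length : Int) - 2) 1).filter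
          (fun i => decide (PySem.List.pyGetD levels i 0 - PySem.List.pyGetD levels (i-1) 0 ≥ tsc ∧
                            PySem.List.pyGetD levels (i-1) 0 - PySem.List.pyGetD levels (i-2) 0 < tsc)))
        pending pauses
        ((PySem.List.pyRange a ((levels.length : Int) - 2) 1).filter
          (fun i => decide (PySem.List.pyGetD levels i 0 - PySem.List.pyGetD levels (i+1) 0 ≥ tsc ∧
                            PySem.List.pyGetD levels (i+1) 0 - PySem.List.pyGetD levels (i+2) 0 < tsc))) := by
  intro n
  induction n with
  | zero =>
    intro a ha pauses pending
    have hba : (levels.length : Int) - 2 ≤ a := by omega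
    rw [PySem.List.pyRange_one_eq_nil hba]
    simp [pvPair]
  | succ n ih =>
    intro a ha pauses pending
    set b : Int := (levels.length : Int) - 2 with hb
    have hab : a < b := by omega
    rw [PySem.List.pyRange_one_cons hab]
    have hgt : ∀ x ∈ PySem.List.pyRange (a+1) b 1, a < x := by
      intro x hx
      have := (PySem.List.mem_pyRange_one).1 hx
      omega
    have hgtS : ∀ s ∈ (PySem.List.pyRange (a+1) b 1).filter
        (fun i => decide (PySem.List.pyGetD levels i 0 - PySem.List.pyGetD levels (i-1) 0 ≥ tsc ∧
                          PySem.List.pyGetD levels (i-1) 0 - PySem.List.pyGetD levels (i-2) 0 < tsc)), a < s :=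
      fun s hs => hgt s (List.mem_filter.1 hs).1
    have hgtE : ∀ e ∈ (PySem.List.pyRange (a+1) b 1).filter
        (fun i => decide (PySem.List.pyGetD levels i 0 - PySem.List.pyGetD levels (i+1) 0 ≥ tsc ∧
                          PySem.List.pyGetD levels (i+1) 0 - PySem.List.pyGetD levels (i+2) 0 < tsc)), a ≤ e :=
      fun e he => le_of_lt (hgt e (List.mem_filter.1 he).1)
    rw [List.foldl_cons, List.filter_cons, List.filter_cons]
    by_cases hS : PySem.List.pyGetD levels a 0 - PySem.List.pyGetD levels (a-1) 0 ≥ tsc ∧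
                  PySem.List.pyGetD levels (a-1) 0 - PySem.List.pyGetD levels (a-2) 0 < tsc <;>
    by_cases hE : PySem.List.pyGetD levels a 0 - PySem.List.pyGetD levels (a+1) 0 ≥ tsc ∧
                  PySem.List.pyGetD levels (a+1) 0 - PySem.List.pyGetD levels (a+2) 0 < tsc
    · -- start and end both fire at a: the pair (a, a) is emitted on both sides
      simp only [hS, hE, and_self, decide_true, if_true]
      simp only [pvPair, pvTake, le_refl, if_true]
      rw [pvTake_gt a (some a) _ hgtS]
      exact ih (a+1) (by omega) _ _
    · -- only a start at a
      simp only [hS, hE, and_self, decide_true, decide_false, Bool.false_eq_true,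
                 if_true, if_false]
      rw [pvPair_cons a _ _ _ _ hgtE]
      exact ih (a+1) (by omega) _ _
    · -- only an end at a: whether it pairs depends on pending
      simp only [hS, hE, and_self, decide_true, decide_false, Bool.false_eq_true,
                 if_true, if_false]
      cases pending with
      | none =>
        simp only [pvPair]
        rw [pvTake_gt a none _ hgtS]
        exact ih (a+1) (by omega) _ _
      | some p =>
        simp only [pvPair]
        rw [pvTake_gt a (some p) _ hgtS]
        exact ih (a+1) (by omega) _ _
    · -- no event at a
      simp only [hS, hE, decide_false, Bool.false_eq_true, if_false]
      exact ih (a+1) (by omega) _ _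

-- ===== VERDICT (by name: the statement is the Claim_ definition above) =====
theorem search_noise_pauses_py_spec : Claim_equal_search_noise_pauses_py := by
  intro levels tsc _
  unfold Spec_search_noise_pauses_py search_noise_pauses_py search_noise_pauses_py_alt
  exact pv_main levels tsc ((levels.length : Int) - 2 - 2).toNat 2 rfl [] none
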